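-- pv_equiv track=rewrite | github.com/JoahG2002/netwerkanalyseNederlandseSpoorwegen2024 | nederlandseSpoorwegen/station.py | geef_top_n_stations
-- ===== SOURCE A (Python) =====
-- from collections import Counter
--
-- def geef_top_n_stations(waarden_per_eenheid: dict[str, int | float], n: int = 10) -> dict[str, int | float]:
--     """
--     Ontvangt een dictionary stations met hun waarden, en geeft de top n stations terug — van groot naar klein.
--     """
--     counter: Counter = Counter(waarden_per_eenheid)
--
--     top_n_stations: dict[str, int | float] = {}
--
--     for station, waarde in counter.most_common():
--         if len(top_n_stations) < n:
--             top_n_stations[station] = waarde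
--         elif waarde == list(top_n_stations.values())[-1]:
--             top_n_stations[station] = waarde
--         else:
--             break
--
--     return top_n_stations
-- ===== SOURCE B (Python) =====
-- def geef_top_n_stations(waarden_per_eenheid: dict[str, int | float], n: int = 10) -> dict[str, int | float]:
--     """
--     Geeft de top-n stations (waarde aflopend, gelijkspel blijft staan) via een drempelwaarde:
--     quickselect bepaalt de n-de grootste waarde, waarna alleen de geselecteerde paren gesorteerd worden.
--     """
--     paren = list(waarden_per_eenheid.items())
--
--     if 0 < n < len(paren):
--         drempel = _nde_grootste([waarde for _, waarde in paren], n - 1)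
--         paren = [paar for paar in paren if paar[1] >= drempel]
--
--     paren.sort(key=lambda paar: paar[1], reverse=True)
--
--     return dict(paren)
--
--
-- def _nde_grootste(waarden: list, k: int):
--     """De k-de (0-gebaseerde) grootste waarde van een niet-lege lijst, via quickselect."""
--     pivot = waarden[len(waarden) // 2]
--
--     groter = [waarde for waarde in waarden if waarde > pivot]
--     if k < len(groter):
--         return _nde_grootste(groter, k)
--
--     gelijk = waarden.count(pivot)
--     if k < len(groter) + gelijk:
--         return pivot
--
--     return _nde_grootste([waarde for waarde in waarden if waarde < pivot], k - len(groter) - gelijk)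
-- ===== Notes on version B (the rewrite author's own statement) =====
-- stated objective: alternative
-- what changed: A sorts all m entries and then walks them building the result dict until the tie run ends; B quickselects the n-th largest value as a threshold, filters the entries once, and sorts only the kept entries. Pre_ excludes only the inputs where A raises IndexError (a nonempty dict with n <= 0).
import Mathlib
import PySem

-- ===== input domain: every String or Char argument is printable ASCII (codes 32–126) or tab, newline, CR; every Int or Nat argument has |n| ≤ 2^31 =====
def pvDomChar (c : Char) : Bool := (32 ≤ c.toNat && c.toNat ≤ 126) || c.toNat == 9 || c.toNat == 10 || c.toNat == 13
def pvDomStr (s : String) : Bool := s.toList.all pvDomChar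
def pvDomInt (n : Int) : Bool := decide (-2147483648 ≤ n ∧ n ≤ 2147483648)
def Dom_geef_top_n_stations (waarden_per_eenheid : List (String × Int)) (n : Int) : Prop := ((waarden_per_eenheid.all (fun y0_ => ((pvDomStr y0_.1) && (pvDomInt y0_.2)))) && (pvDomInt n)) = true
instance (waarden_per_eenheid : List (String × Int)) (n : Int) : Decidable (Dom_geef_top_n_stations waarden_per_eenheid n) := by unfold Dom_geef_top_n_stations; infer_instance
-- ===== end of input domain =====

-- B replaces A's full-sort + incremental tie loop by a quickselect threshold: it selects the
-- n-th largest value, filters the entries once, and sorts only the kept entries (objective: alternative).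


-- ===== PORT A =====
-- the 'for station, waarde in counter.most_common():' loop, with its break
def pvLoopA (n : Int) : List (String × Int) → PySem.Dict String Int → PySem.Dict String Int
  | [], top => top
  | (station, waarde) :: rest, top =>
    if (top.size : Int) < n then
      pvLoopA n rest (top.insert station waarde)
    else
      match PySem.List.pyGet? top.values (-1) with
      | some laatste =>
        if waarde = laatste then pvLoopA n rest (top.insert station waarde)
        else top
      | none => top  -- Python raises IndexError here (index -1 of an empty value list); excluded by Pre_

def geef_top_n_stations (waarden_per_eenheid : List (String × Int)) (n : Int) : List (String × Int) :=
  let counter := PySem.Dict.ofList waarden_per_eenheid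
  (pvLoopA n (PySem.List.sorted counter.items (fun p => p.2) true) PySem.Dict.empty).items

-- ===== PORT B =====
-- quickselect: the k-th (0-based) largest value of a nonempty list
def pvNdeGrootste : List Int → Int → Int
  | [], _ => 0  -- Python would raise IndexError on waarden[len(waarden)//2]; B never calls it on []
  | w :: ws, k =>
    let waarden := w :: ws
    let pivot := waarden[waarden.length / 2]'(Nat.div_lt_self (Nat.succ_pos _) (by norm_num))
    let groter := waarden.filter (fun x => pivot < x)
    if k < (groter.length : Int) then
      pvNdeGrootste groter k
    else
      let gelijk := waarden.count pivot
      if k < (groter.length : Int) + (gelijk : Int) then pivot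
      else pvNdeGrootste (waarden.filter (fun x => x < pivot)) (k - groter.length - gelijk)
termination_by waarden _ => waarden.length
decreasing_by
  · exact List.length_filter_lt_length_iff_exists.mpr
      ⟨(w :: ws)[(w :: ws).length / 2]'(Nat.div_lt_self (Nat.succ_pos _) (by norm_num)),
        List.getElem_mem _, by simp⟩
  · exact List.length_filter_lt_length_iff_exists.mpr
      ⟨(w :: ws)[(w :: ws).length / 2]'(Nat.div_lt_self (Nat.succ_pos _) (by norm_num)),
        List.getElem_mem _, by simp⟩

def geef_top_n_stations_alt (waarden_per_eenheid : List (String × Int)) (n : Int) : List (String × Int) :=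
  let paren := (PySem.Dict.ofList waarden_per_eenheid).items
  let paren2 :=
    if 0 < n ∧ n < (paren.length : Int) then
      let drempel := pvNdeGrootste (paren.map (fun p => p.2)) (n - 1)
      paren.filter (fun p => drempel ≤ p.2)
    else paren
  PySem.List.sorted paren2 (fun p => p.2) true

-- ===== PRECONDITION & SPEC =====
-- Pre_ excludes exactly the inputs where A raises: on a nonempty dict with n ≤ 0 A indexes
-- the still-empty result's value list at -1 and raises IndexError.
def Pre_geef_top_n_stations (waarden_per_eenheid : List (String × Int)) (n : Int) : Prop :=
  waarden_per_eenheid = [] ∨ 1 ≤ n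
instance (waarden_per_eenheid : List (String × Int)) (n : Int) : Decidable (Pre_geef_top_n_stations waarden_per_eenheid n) := by unfold Pre_geef_top_n_stations; infer_instance

def pvWitness_geef_top_n_stations : (List (String × Int)) × Int := ([("Amsterdam", 3), ("Utrecht", 5)], 1)

def Spec_geef_top_n_stations (waarden_per_eenheid : List (String × Int)) (n : Int) (out : List (String × Int)) : Prop := out = geef_top_n_stations_alt waarden_per_eenheid n
instance (waarden_per_eenheid : List (String × Int)) (n : Int) (out : List (String × Int)) : Decidable (Spec_geef_top_n_stations waarden_per_eenheid n out) := by unfold Spec_geef_top_n_stations; infer_instance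

-- ===== CLAIM (what is proved, stated in full; the proofs are below) =====
def Claim_equal_geef_top_n_stations : Prop := ∀ (waarden_per_eenheid : List (String × Int)) (n : Int), Dom_geef_top_n_stations waarden_per_eenheid n → Pre_geef_top_n_stations waarden_per_eenheid n → Spec_geef_top_n_stations waarden_per_eenheid n (geef_top_n_stations waarden_per_eenheid n)

-- ===== LEMMAS AND PROOFS =====

lemma pvPyGet_neg_one {α : Type} (l : List α) : PySem.List.pyGet? l (-1) = l.getLast? := by
  rcases l with _ | ⟨a, t⟩
  · rfl
  · show ((PySem.List.pyIdx? (a :: t).length (-1)).bind fun k => (a :: t)[k]?) = _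
    rw [PySem.List.pyIdx?, if_neg (by omega), if_pos (by simp only [List.length_cons]; push_cast; omega)]
    simp [List.getLast?_eq_getElem?]

lemma pvInsertBy_pairwise {α κ : Type} [LinearOrder κ] (key : α → κ) (x : α) (ys : List α)
    (h : ys.Pairwise (fun a b => key b ≤ key a)) :
    (PySem.List.insertBy (fun a b => decide (key b < key a)) x ys).Pairwise
      (fun a b => key b ≤ key a) := by
  induction ys with
  | nil => simp [PySem.List.insertBy]
  | cons y ys ih =>
    rw [PySem.List.insertBy]
    by_cases hb : key y < key x
    · simp only [hb, decide_true, if_true]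
      refine List.Pairwise.cons ?_ h
      intro z hz
      rcases List.mem_cons.mp hz with rfl | hz
      · exact hb.le
      · exact le_trans (List.rel_of_pairwise_cons h hz) hb.le
    · simp only [hb, decide_false]
      refine List.Pairwise.cons ?_ (ih h.tail)
      intro z hz
      rcases (PySem.List.mem_insertBy _ _ _ _).mp hz with rfl | hz
      · exact le_of_not_gt hb
      · exact List.rel_of_pairwise_cons h hz

lemma pvFilter_insertBy {α κ : Type} [LinearOrder κ] (key : α → κ) (p : α → Bool)
    (x : α) (ys : List α)
    (h : ys.Pairwise (fun a b => key b ≤ key a)) :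
    (PySem.List.insertBy (fun a b => decide (key b < key a)) x ys).filter p
      = if p x then PySem.List.insertBy (fun a b => decide (key b < key a)) x (ys.filter p)
        else ys.filter p := by
  induction ys with
  | nil => by_cases hx : p x <;> simp [PySem.List.insertBy, hx]
  | cons y ys ih =>
    rw [PySem.List.insertBy]
    by_cases hb : key y < key x
    · simp only [hb, decide_true, if_true]
      by_cases hx : p x
      · simp only [if_true, List.filter_cons, hx]
        by_cases hy : p y
        · simp [hy, PySem.List.insertBy, hb]
        · -- p y false: need insertBy x (filter p ys) = x :: filter p ys
          simp only [hy, Bool.false_eq_true, not_false_iff, if_neg]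
          rcases hfy : ys.filter p with _ | ⟨z, zs⟩
          · simp [PySem.List.insertBy]
          · have hz : z ∈ ys := List.mem_of_mem_filter (hfy ▸ List.mem_cons_self ..)
            have hzy : key z ≤ key y := List.rel_of_pairwise_cons h hz
            rw [PySem.List.insertBy, if_pos (by simp; exact lt_of_le_of_lt hzy hb)]
      · simp [hx, List.filter_cons]
    · simp only [hb, decide_false, Bool.false_eq_true, if_false]
      rw [List.filter_cons, List.filter_cons]
      by_cases hy : p y
      · simp only [hy, if_true, ih h.tail]
        by_cases hx : p x
        · simp only [hx, if_true]
          rw [PySem.List.insertBy, if_neg (by simpa using hb)]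
        · simp [hx]
      · simp only [hy, Bool.false_eq_true, if_false, ih h.tail]

lemma pvSorted_foldl_aux {α κ : Type} [LinearOrder κ] (key : α → κ) (p : α → Bool)
    (xs : List α) : ∀ (acc : List α), acc.Pairwise (fun a b => key b ≤ key a) →
    (xs.foldl (fun acc x => PySem.List.insertBy (fun a b => decide (key b < key a)) x acc) acc).filter p
      = (xs.filter p).foldl (fun acc x => PySem.List.insertBy (fun a b => decide (key b < key a)) x acc) (acc.filter p) := by
  induction xs with
  | nil => intro acc _; simp
  | cons x xs ih =>
    intro acc hacc
    rw [List.foldl_cons, List.filter_cons]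
    have hins := pvInsertBy_pairwise key x acc hacc
    by_cases hx : p x
    · rw [if_pos hx, List.foldl_cons, ih _ hins,
        pvFilter_insertBy key p x acc hacc, if_pos hx]
    · rw [if_neg (by simp [hx]), ih _ hins, pvFilter_insertBy key p x acc hacc,
        if_neg (by simp [hx])]

lemma pvFilter_sorted_rev {α κ : Type} [LinearOrder κ] (key : α → κ) (p : α → Bool)
    (xs : List α) :
    (PySem.List.sorted xs key true).filter p = PySem.List.sorted (xs.filter p) key true := by
  rw [PySem.List.sorted_rev_eq_foldl_insertBy, PySem.List.sorted_rev_eq_foldl_insertBy]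
  simpa using pvSorted_foldl_aux key p xs [] (by simp)

lemma pvCount_filter_neg {p : Int → Bool} {a : Int} (l : List Int) (h : p a = false) :
    List.count a (List.filter p l) = 0 :=
  List.count_eq_zero.mpr (fun hm => by simp [List.mem_filter, h] at hm)
lemma pvPerm_partition (l : List Int) (v : Int) :
    l.Perm (l.filter (fun x => decide (v < x))
      ++ (List.replicate (l.count v) v ++ l.filter (fun x => decide (x < v)))) := by
  rw [List.perm_iff_count]
  intro a
  simp only [List.count_append, List.count_replicate]
  rcases lt_trichotomy v a with hlt | rfl | hgt
  · rw [List.count_filter (by simpa using hlt), pvCount_filter_neg l (by simp; omega)]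
    simp; omega
  · rw [pvCount_filter_neg l (by simp), pvCount_filter_neg l (by simp)]
    simp
  · rw [List.count_filter (p := fun x => decide (x < v)) (by simpa using hgt),
      pvCount_filter_neg (p := fun x => decide (v < x)) l (by simp; omega)]
    simp; omega

lemma pvSorted_decomp (l : List Int) (v : Int) :
    PySem.List.sorted l (fun x => x) true
      = PySem.List.sorted (l.filter (fun x => decide (v < x))) (fun x => x) true
        ++ (List.replicate (l.count v) v
          ++ PySem.List.sorted (l.filter (fun x => decide (x < v))) (fun x => x) true) := by
  apply List.Perm.eq_of_pairwise (le := fun a b : Int => b ≤ a)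
  · exact fun a b _ _ h1 h2 => le_antisymm h2 h1
  · exact PySem.List.sorted_pairwise_rev l (fun x => x)
  · rw [List.pairwise_append, List.pairwise_append]
    refine ⟨PySem.List.sorted_pairwise_rev _ _, ⟨List.pairwise_replicate.mpr (by simp), ?_, ?_⟩, ?_⟩
    · exact PySem.List.sorted_pairwise_rev _ _
    · intro a ha b hb
      rcases List.eq_of_mem_replicate ha with rfl
      have hb' := (PySem.List.mem_sorted _ _ _ _).mp hb
      have := (List.mem_filter.mp hb').2
      simp at this; omega
    · intro a ha b hb
      have ha' := (PySem.List.mem_sorted _ _ _ _).mp ha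
      have h1 := (List.mem_filter.mp ha').2
      rcases List.mem_append.mp hb with hb | hb
      · rcases List.eq_of_mem_replicate hb with rfl
        simp at h1; omega
      · have hb' := (PySem.List.mem_sorted _ _ _ _).mp hb
        have h2 := (List.mem_filter.mp hb').2
        simp at h1 h2; omega
  · exact (PySem.List.sorted_perm l (fun x => x) true).trans
      ((pvPerm_partition l v).trans
        (List.Perm.append ((PySem.List.sorted_perm _ _ _).symm)
          (List.Perm.append (List.Perm.refl _) ((PySem.List.sorted_perm _ _ _).symm))))

lemma pvNdeGrootste_eq_aux : ∀ (N : Nat) (vals : List Int), vals.length ≤ N →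
    ∀ (k : Int), 0 ≤ k → k < (vals.length : Int) →
    pvNdeGrootste vals k = (PySem.List.sorted vals (fun x => x) true).getD k.toNat 0 := by
  intro N
  induction N with
  | zero =>
    intro vals hlen k h0 hk
    interval_cases h : vals.length
    omega
  | succ N ihN =>
    rintro (_ | ⟨w, ws⟩) hlen k h0 hk
    · simp at hk; omega
    · rw [pvNdeGrootste]
      set pivot := (w :: ws)[(w :: ws).length / 2]'(Nat.div_lt_self (Nat.succ_pos _) (by norm_num)) with hpiv
      set groter := (w :: ws).filter (fun x => decide (pivot < x)) with hgro
      set kleiner := (w :: ws).filter (fun x => decide (x < pivot)) with hkl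
      set gelijk := (w :: ws).count pivot with hgel
      have hglt : groter.length < (w :: ws).length := by
        rw [hgro]
        exact List.length_filter_lt_length_iff_exists.mpr ⟨pivot, List.getElem_mem _, by simp⟩
      have hklt : kleiner.length < (w :: ws).length := by
        rw [hkl]
        exact List.length_filter_lt_length_iff_exists.mpr ⟨pivot, List.getElem_mem _, by simp⟩
      have hlen3 : (w :: ws).length = groter.length + gelijk + kleiner.length := by
        have h := (pvPerm_partition (w :: ws) pivot).length_eq
        rw [List.length_append, List.length_append, List.length_replicate,
          ← hgro, ← hkl, ← hgel] at h
        simp only [List.length_cons] at h ⊢; omega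
      rw [pvSorted_decomp (w :: ws) pivot, ← hgro, ← hkl, ← hgel]
      by_cases h1 : k < (groter.length : Int)
      · rw [if_pos h1, List.getD_append _ _ _ _ (by rw [PySem.List.length_sorted]; omega)]
        exact ihN groter (by omega) k h0 h1
      · rw [if_neg h1,
          List.getD_append_right _ _ _ _ (by rw [PySem.List.length_sorted]; omega),
          PySem.List.length_sorted]
        by_cases h2 : k < (groter.length : Int) + (gelijk : Int)
        · rw [if_pos h2, List.getD_append _ _ _ _ (by simp [List.length_replicate]; omega)]
          exact (List.getD_replicate pivot (show k.toNat - groter.length < gelijk by omega)).symm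
        · rw [if_neg h2,
            List.getD_append_right _ _ _ _ (by simp [List.length_replicate]; omega),
            List.length_replicate]
          rw [ihN kleiner (by omega) (k - groter.length - gelijk) (by omega) (by omega)]
          congr 1
          omega

lemma pvNdeGrootste_eq (vals : List Int) (k : Int) (h0 : 0 ≤ k) (hk : k < (vals.length : Int)) :
    pvNdeGrootste vals k = (PySem.List.sorted vals (fun x => x) true).getD k.toNat 0 :=
  pvNdeGrootste_eq_aux vals.length vals le_rfl k h0 hk

lemma pvSorted_map_snd (d : List (String × Int)) :
    PySem.List.sorted (d.map (fun p => p.2)) (fun x => x) true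
      = (PySem.List.sorted d (fun p => p.2) true).map (fun p => p.2) := by
  apply List.Perm.eq_of_pairwise (le := fun a b : Int => b ≤ a)
  · exact fun a b _ _ h1 h2 => le_antisymm h2 h1
  · exact PySem.List.sorted_pairwise_rev _ _
  · exact List.pairwise_map.mpr (PySem.List.sorted_pairwise_rev d (fun p => p.2))
  · exact (PySem.List.sorted_perm _ _ _).trans
      (((PySem.List.sorted_perm d (fun p => p.2) true).map (fun p => p.2)).symm)

lemma pvTakeWhile_eq_filter (t : Int) (l : List (String × Int))
    (hd : l.Pairwise (fun a b => b.2 ≤ a.2)) (hle : ∀ p ∈ l, p.2 ≤ t) :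
    l.takeWhile (fun p => p.2 == t) = l.filter (fun p => decide (t ≤ p.2)) := by
  induction l with
  | nil => rfl
  | cons x l ih =>
    by_cases hx : x.2 = t
    · rw [List.takeWhile_cons, if_pos (by simp [hx]), List.filter_cons,
        if_pos (by simp [hx]), ih hd.tail (fun p hp => hle p (List.mem_cons_of_mem _ hp))]
    · have hxlt : x.2 < t := lt_of_le_of_ne (hle x (List.mem_cons_self ..)) hx
      rw [List.takeWhile_cons, if_neg (by simp [hx]), List.filter_cons,
        if_neg (by simp; omega)]
      symm
      rw [List.filter_eq_nil_iff]
      intro p hp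
      have := List.rel_of_pairwise_cons hd hp
      simp; omega

lemma pvTake_filter (s : List (String × Int)) (k : Nat) (hk1 : 1 ≤ k) (hk : k < s.length)
    (hd : s.Pairwise (fun a b => b.2 ≤ a.2)) :
    s.take k ++ (s.drop k).takeWhile (fun p => p.2 == (s[k-1]'(by omega)).2)
      = s.filter (fun p => decide ((s[k-1]'(by omega)).2 ≤ p.2)) := by
  set t := (s[k-1]'(by omega)).2 with ht
  have hmono := List.pairwise_iff_getElem.mp hd
  have htake : ∀ p ∈ s.take k, t ≤ p.2 := by
    intro p hp
    rcases List.mem_iff_getElem.mp hp with ⟨i, hi, rfl⟩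
    have hi' : i < k := by simpa using (lt_of_lt_of_le hi (by simp))
    rw [List.getElem_take]
    rcases Nat.lt_or_ge i (k-1) with h | h
    · exact (hmono i (k-1) (by omega) (by omega) h)
    · have : i = k - 1 := by omega
      subst this; rfl
  have hdrop : ∀ p ∈ s.drop k, p.2 ≤ t := by
    intro p hp
    rcases List.mem_iff_getElem.mp hp with ⟨i, hi, rfl⟩
    rw [List.getElem_drop]
    exact hmono (k-1) (k+i) (by omega) (by have := hi; simp at this; omega) (by omega)
  conv_rhs => rw [← List.take_append_drop k s]
  rw [List.filter_append]
  congr 1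
  · symm
    rw [List.filter_eq_self]
    intro p hp; simpa using htake p hp
  · exact pvTakeWhile_eq_filter t (s.drop k) (hd.drop) hdrop

lemma pvLoopA_fill (n : Int) (as : List (String × Int)) (bs : List (String × Int))
    (top : PySem.Dict String Int)
    (h1 : (top.size : Int) + as.length ≤ n)
    (h2 : ∀ p ∈ as, top.contains p.1 = false)
    (h3 : (as.map Prod.fst).Nodup) :
    pvLoopA n (as ++ bs) top
      = pvLoopA n bs (as.foldl (fun d p => d.insert p.1 p.2) top) := by
  induction as generalizing top with
  | nil => simp
  | cons a as ih =>
    rcases a with ⟨s, v⟩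
    rw [List.cons_append, pvLoopA, if_pos (by simp at h1; omega), List.foldl_cons]
    have hc : top.contains s = false := h2 (s, v) (List.mem_cons_self ..)
    apply ih
    · rw [PySem.Dict.size_insert]
      simp only [hc, Bool.false_eq_true, if_false]
      simp at h1 ⊢; omega
    · intro p hp
      rw [PySem.Dict.contains_insert]
      have hne : p.1 ≠ s := by
        have hs : s ∉ as.map Prod.fst := (List.nodup_cons.mp (by simpa using h3)).1
        exact fun he => hs (he ▸ List.mem_map_of_mem hp)
      simp [hne, h2 p (List.mem_cons_of_mem _ hp)]
    · exact (List.nodup_cons.mp (by simpa using h3)).2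

lemma pvLoopA_tie (n : Int) (xs : List (String × Int)) (top : PySem.Dict String Int) (t : Int)
    (hsz : n ≤ (top.size : Int))
    (hlast : PySem.List.pyGet? top.values (-1) = some t)
    (hfresh : ∀ p ∈ xs, top.contains p.1 = false)
    (hnd : (xs.map Prod.fst).Nodup) :
    (pvLoopA n xs top).items = top.items ++ xs.takeWhile (fun p => p.2 == t) := by
  induction xs generalizing top with
  | nil => simp [pvLoopA]
  | cons x xs ih =>
    rcases x with ⟨s, v⟩
    have hc : top.contains s = false := hfresh (s, v) (List.mem_cons_self ..)
    rw [pvLoopA, if_neg (by omega), hlast]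
    show (if v = t then pvLoopA n xs (top.insert s v) else top).items
      = top.items ++ List.takeWhile (fun p => p.2 == t) ((s, v) :: xs)
    by_cases hv : v = t
    · rw [if_pos hv, List.takeWhile_cons, if_pos (by simp [hv])]
      have hitems : (top.insert s v).items = top.items ++ [(s, v)] :=
        PySem.Dict.items_insert_of_not_contains top v hc
      rw [ih (top.insert s v)]
      · rw [hitems]; simp
      · rw [PySem.Dict.size_insert]; simp only [hc, Bool.false_eq_true, if_false]
        push_cast; omega
      · show PySem.List.pyGet? (top.insert s v).values (-1) = some t
        have : (top.insert s v).values = top.values ++ [v] := by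
          show ((top.insert s v).items.map (fun p => p.2)) = _
          rw [hitems]; simp [PySem.Dict.values]
        rw [this, pvPyGet_neg_one]
        simp [hv]
      · intro p hp
        rw [PySem.Dict.contains_insert]
        have hne : p.1 ≠ s := by
          have hs : s ∉ xs.map Prod.fst := (List.nodup_cons.mp (by simpa using hnd)).1
          exact fun he => hs (he ▸ List.mem_map_of_mem hp)
        simp [hne, hfresh p (List.mem_cons_of_mem _ hp)]
      · exact (List.nodup_cons.mp (by simpa using hnd)).2
    · rw [if_neg hv, List.takeWhile_cons, if_neg (by simp [hv])]
      simp

-- ===== VERDICT (by name: the statement is the Claim_ definition above) =====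
theorem geef_top_n_stations_spec : Claim_equal_geef_top_n_stations := by
  intro w n hdom hpre
  unfold Spec_geef_top_n_stations geef_top_n_stations geef_top_n_stations_alt
  simp only []
  set d := (PySem.Dict.ofList w).items with hd
  have hnd : (d.map Prod.fst).Nodup := by
    have h := PySem.Dict.nodup_keys_ofList w
    simpa [PySem.Dict.keys] using h
  set srt := PySem.List.sorted d (fun p => p.2) true with hsrt
  have hperm : srt.Perm d := PySem.List.sorted_perm d _ true
  have hlen : srt.length = d.length := PySem.List.length_sorted d _ true
  have hndsrt : (srt.map Prod.fst).Nodup := ((hperm.map Prod.fst).nodup_iff).mpr hnd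
  have hdesc : srt.Pairwise (fun a b => b.2 ≤ a.2) := PySem.List.sorted_pairwise_rev d _
  by_cases hn1 : 1 ≤ n
  · by_cases hcase : n < (d.length : Int)
    · -- threshold case: n entries plus ties
      set k : Nat := n.toNat with hkdef
      have hk1 : 1 ≤ k := by omega
      have hkm : k < srt.length := by omega
      have hkd : k < d.length := by omega
      set t : Int := (srt[k-1]'(by omega)).2 with ht
      -- A side: fill phase over the first k entries
      have hmapsplit : srt.map Prod.fst = (srt.take k).map Prod.fst ++ (srt.drop k).map Prod.fst := by
        rw [← List.map_append, List.take_append_drop]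
      have hndtake : ((srt.take k).map Prod.fst).Nodup := by
        rw [hmapsplit] at hndsrt; exact (List.nodup_append.mp hndsrt).1
      have hnddrop : ((srt.drop k).map Prod.fst).Nodup := by
        rw [hmapsplit] at hndsrt; exact (List.nodup_append.mp hndsrt).2.1
      have hdisj : ∀ a ∈ (srt.take k).map Prod.fst, a ∉ (srt.drop k).map Prod.fst := by
        rw [hmapsplit] at hndsrt
        exact fun a ha hb => List.disjoint_of_nodup_append hndsrt ha hb
      have hlentake : (srt.take k).length = k := by simp; omega
      conv_lhs => rw [← List.take_append_drop k srt]
      rw [pvLoopA_fill n (srt.take k) (srt.drop k) PySem.Dict.empty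
        (by simp only [PySem.Dict.size, PySem.Dict.empty]; simp; omega)
        (fun p _ => PySem.Dict.contains_empty p.1) hndtake]
      set top1 := (srt.take k).foldl (fun d p => d.insert p.1 p.2) PySem.Dict.empty with htop1def
      have htop1 : top1.items = srt.take k := by
        rw [htop1def, PySem.Dict.items_foldl_insert_fresh (srt.take k) Prod.fst Prod.snd
          PySem.Dict.empty (fun p _ => PySem.Dict.contains_empty p.1) hndtake]
        simp
        rfl
      have hsz1 : top1.size = k := by
        rw [PySem.Dict.size, htop1, hlentake]
      have htakelast : (srt.take k).getLast? = some (srt[k-1]'(by omega)) := by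
        rw [List.getLast?_eq_getElem?, hlentake, List.getElem?_take, if_pos (by omega)]
        exact List.getElem?_eq_getElem _
      have hlast1 : PySem.List.pyGet? top1.values (-1) = some t := by
        rw [PySem.Dict.values, htop1, pvPyGet_neg_one, List.getLast?_map, htakelast, ht]
        rfl
      have hfresh1 : ∀ p ∈ srt.drop k, top1.contains p.1 = false := by
        intro p hp
        rcases Bool.eq_false_or_eq_true (top1.contains p.1) with h | h
        swap
        · exact h
        · exfalso
          have hmem := (PySem.Dict.contains_iff_mem_keys top1 p.1).mp h
          have : top1.keys = (srt.take k).map Prod.fst := by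
            rw [PySem.Dict.keys, htop1]
          rw [this] at hmem
          exact hdisj p.1 hmem (List.mem_map_of_mem hp)
      rw [pvLoopA_tie n (srt.drop k) top1 t (by rw [hsz1]; omega) hlast1 hfresh1 hnddrop, htop1]
      rw [pvTake_filter srt k hk1 hkm hdesc]
      -- B side
      rw [if_pos ⟨by omega, hcase⟩]
      have hdrempel : pvNdeGrootste (d.map (fun p => p.2)) (n - 1) = t := by
        rw [pvNdeGrootste_eq (d.map (fun p => p.2)) (n - 1) (by omega) (by simp; omega)]
        rw [pvSorted_map_snd d, ← hsrt]
        rw [List.getD_eq_getElem _ _ (by simp; omega)]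
        rw [List.getElem_map]
        have hidx : (n - 1).toNat = k - 1 := by omega
        simp only [hidx, ht]
      rw [hdrempel, ← pvFilter_sorted_rev (fun p => p.2) (fun p => decide (t ≤ p.2)) d, ← hsrt]
    · -- everything fits: the loop inserts all of srt, B keeps all of paren
      rw [if_neg (by omega)]
      conv_lhs => rw [← List.append_nil srt]
      rw [pvLoopA_fill n srt [] PySem.Dict.empty
        (by simp only [PySem.Dict.size, PySem.Dict.empty]; simp; omega)
        (fun p _ => PySem.Dict.contains_empty p.1)
        hndsrt]
      rw [pvLoopA]
      rw [PySem.Dict.items_foldl_insert_fresh srt Prod.fst Prod.snd PySem.Dict.empty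
        (fun p _ => PySem.Dict.contains_empty p.1) hndsrt]
      simp
      rfl
  · -- Pre_ forces w = [], so the dict is empty and both sides are []
    have hw : w = [] := by rcases hpre with h | h; exact h; omega
    subst hw
    have hd0 : d = [] := rfl
    rw [hd0] at hsrt ⊢
    have hs0 : srt = [] := by rw [hsrt]; rfl
    rw [hs0, if_neg (by simp; omega)]
    rw [pvLoopA]
    rfl
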